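-- pv_equiv track=rewrite | github.com/BippleDops/Veridia | _SCRIPTS/writing_quality_10k_improvements.py | generate_pronunciation
-- ===== SOURCE A (Python) =====
-- def generate_pronunciation(name):
--     """Generate pronunciation guide for complex names"""
--     # Simple phonetic approximation
--     pronunciation = name.lower()
--     pronunciation = pronunciation.replace('th', 'th')
--     pronunciation = pronunciation.replace('ch', 'ch')
--     pronunciation = pronunciation.replace('ph', 'f')
--     pronunciation = pronunciation.replace('tion', 'shun')
--     pronunciation = pronunciation.replace('ae', 'ay')
--     pronunciation = pronunciation.replace('oe', 'oh')
--
--     # Add syllable breaks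
--     syllables = []
--     current = ""
--     for char in pronunciation:
--         current += char
--         if char in 'aeiou' and len(current) > 1:
--             syllables.append(current)
--             current = ""
--     if current:
--         syllables.append(current)
--
--     return '-'.join(syllables).upper()
-- ===== SOURCE B (Python) =====
-- def generate_pronunciation(name):
--     """Generate pronunciation guide for complex names"""
--     pronunciation = name.lower()
--     pronunciation = pronunciation.replace('th', 'th')
--     pronunciation = pronunciation.replace('ch', 'ch')
--     pronunciation = pronunciation.replace('ph', 'f')
--     pronunciation = pronunciation.replace('tion', 'shun')
--     pronunciation = pronunciation.replace('ae', 'ay')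
--     pronunciation = pronunciation.replace('oe', 'oh')
--
--     # Two-pointer grouping: each syllable is one char, then non-vowels, then
--     # an optional vowel -- taken as a slice, no char-by-char accumulator.
--     syllables = []
--     i, n = 0, len(pronunciation)
--     while i < n:
--         j = i + 1
--         while j < n and pronunciation[j] not in 'aeiou':
--             j += 1
--         if j < n:
--             j += 1  # include the vowel that closes the syllable
--         syllables.append(pronunciation[i:j])
--         i = j
--     return '-'.join(syllables).upper()
-- ===== Notes on version B (the rewrite author's own statement) =====
-- stated objective: alternative
-- what changed: Replaced the char-by-char accumulator loop (growing a 'current' string and flushing it on vowels) with a two-pointer scan that takes each syllable directly as a slice: one leading char, a run of non-vowels, and an optional closing vowel.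
import Mathlib
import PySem

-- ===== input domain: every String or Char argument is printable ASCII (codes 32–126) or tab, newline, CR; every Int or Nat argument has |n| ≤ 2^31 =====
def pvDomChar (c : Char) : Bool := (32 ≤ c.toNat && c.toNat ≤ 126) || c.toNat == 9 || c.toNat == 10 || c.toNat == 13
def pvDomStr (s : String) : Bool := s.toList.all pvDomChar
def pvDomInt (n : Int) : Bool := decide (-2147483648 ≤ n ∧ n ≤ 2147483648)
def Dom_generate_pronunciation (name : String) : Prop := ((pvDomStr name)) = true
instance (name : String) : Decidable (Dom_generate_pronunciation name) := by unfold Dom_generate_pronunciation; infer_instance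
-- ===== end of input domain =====

-- B replaces A's character-accumulator loop with a two-pointer syllable scan (same values, similar cost).

-- 'char in "aeiou"' (shared one-char membership test)
def pvVowel (c : Char) : Bool := c == 'a' || c == 'e' || c == 'i' || c == 'o' || c == 'u'

-- ===== PORT A =====
-- the body of A's for-loop: current += char; flush on a vowel when len(current) > 1
def pvStepA (st : List (List Char) × List Char) (char : Char) : List (List Char) × List Char :=
  let current := st.2 ++ [char]
  if pvVowel char && decide (1 < current.length) then (st.1 ++ [current], ([] : List Char))
  else (st.1, current)

def generate_pronunciation (name : String) : String :=
  let p := PySem.Chars.lower name.toList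
  let p := PySem.Chars.replace p ['t','h'] ['t','h']
  let p := PySem.Chars.replace p ['c','h'] ['c','h']
  let p := PySem.Chars.replace p ['p','h'] ['f']
  let p := PySem.Chars.replace p ['t','i','o','n'] ['s','h','u','n']
  let p := PySem.Chars.replace p ['a','e'] ['a','y']
  let p := PySem.Chars.replace p ['o','e'] ['o','h']
  let st := p.foldl pvStepA ([], [])
  let syllables := if st.2 = [] then st.1 else st.1 ++ [st.2]
  String.ofList (PySem.Chars.upper (PySem.Chars.join ['-'] syllables))

-- ===== PORT B =====
-- B's outer while loop: a syllable is one char, a run of non-vowels, and an optional closing vowel;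
-- the inner 'while j < n and not vowel' is the takeWhile/dropWhile split of the suffix.
def pvGroupsB : List Char → List (List Char)
  | [] => []
  | c :: rest =>
    match h : rest.dropWhile (fun x => !pvVowel x) with
    | [] => [c :: rest.takeWhile (fun x => !pvVowel x)]
    | v :: r => (c :: (rest.takeWhile (fun x => !pvVowel x) ++ [v])) :: pvGroupsB r
termination_by cs => cs.length
decreasing_by
  have h1 := List.length_dropWhile_le (p := fun x => !pvVowel x) (l := rest)
  simp [h] at h1
  simp; omega

def generate_pronunciation_alt (name : String) : String :=
  let p := PySem.Chars.lower name.toList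
  let p := PySem.Chars.replace p ['t','h'] ['t','h']
  let p := PySem.Chars.replace p ['c','h'] ['c','h']
  let p := PySem.Chars.replace p ['p','h'] ['f']
  let p := PySem.Chars.replace p ['t','i','o','n'] ['s','h','u','n']
  let p := PySem.Chars.replace p ['a','e'] ['a','y']
  let p := PySem.Chars.replace p ['o','e'] ['o','h']
  String.ofList (PySem.Chars.upper (PySem.Chars.join ['-'] (pvGroupsB p)))

-- ===== PRECONDITION & SPEC =====
def Spec_generate_pronunciation (name : String) (out : String) : Prop := out = generate_pronunciation_alt name
instance (name : String) (out : String) : Decidable (Spec_generate_pronunciation name out) := by unfold Spec_generate_pronunciation; infer_instance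

-- ===== CLAIM (what is proved, stated in full; the proofs are below) =====
def Claim_equal_generate_pronunciation : Prop := ∀ (name : String), Dom_generate_pronunciation name → Spec_generate_pronunciation name (generate_pronunciation name)

-- ===== LEMMAS AND PROOFS =====

-- finishing a pending nonempty syllable `cur`: non-vowels, then an optional closing vowel
def pvGroupFrom (cur cs : List Char) : List (List Char) :=
  match cs.dropWhile (fun x => !pvVowel x) with
  | [] => [cur ++ cs.takeWhile (fun x => !pvVowel x)]
  | v :: r => (cur ++ cs.takeWhile (fun x => !pvVowel x) ++ [v]) :: pvGroupsB r

lemma pvGroupsB_cons (c : Char) (cs : List Char) :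
    pvGroupsB (c :: cs) = pvGroupFrom [c] cs := by
  unfold pvGroupsB pvGroupFrom
  cases h : cs.dropWhile (fun x => !pvVowel x) <;> simp

lemma pvGroupFrom_vowel (cur cs : List Char) (c : Char) (h : pvVowel c = true) :
    pvGroupFrom cur (c :: cs) = (cur ++ [c]) :: pvGroupsB cs := by
  unfold pvGroupFrom
  simp [h]

lemma pvGroupFrom_nonvowel (cur cs : List Char) (c : Char) (h : pvVowel c = false) :
    pvGroupFrom cur (c :: cs) = pvGroupFrom (cur ++ [c]) cs := by
  unfold pvGroupFrom
  simp [h]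

lemma pvLoop (cs : List Char) : ∀ (s : List (List Char)) (cur : List Char),
    (let st := cs.foldl pvStepA (s, cur); if st.2 = [] then st.1 else st.1 ++ [st.2])
    = s ++ (if cur = [] then pvGroupsB cs else pvGroupFrom cur cs) := by
  induction cs with
  | nil =>
    intro s cur
    by_cases hc : cur = [] <;> simp [pvGroupsB, pvGroupFrom, hc]
  | cons c cs ih =>
    intro s cur
    simp only [List.foldl_cons]
    by_cases hv : pvVowel c = true
    · by_cases hc : cur = []
      · subst hc
        have hstep : pvStepA (s, ([] : List Char)) c = (s, [c]) := by simp [pvStepA]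
        rw [hstep, ih]
        simp [pvGroupsB_cons]
      · have hlen : 1 < (cur ++ [c]).length := by
          cases cur with
          | nil => exact absurd rfl hc
          | cons a t => simp
        have hstep : pvStepA (s, cur) c = (s ++ [cur ++ [c]], []) := by
          simp [pvStepA, hv, hc]
        rw [hstep, ih]
        simp [pvGroupFrom_vowel _ _ _ hv, hc]
    · have hv' : pvVowel c = false := by simpa using hv
      have hstep : pvStepA (s, cur) c = (s, cur ++ [c]) := by simp [pvStepA, hv']
      rw [hstep, ih]
      by_cases hc : cur = []
      · subst hc
        simp [pvGroupsB_cons, pvGroupFrom_nonvowel [] cs c hv']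
      · simp [hc, pvGroupFrom_nonvowel cur cs c hv']

lemma pvLoopNil (cs : List Char) :
    (if (cs.foldl pvStepA ([], [])).2 = [] then (cs.foldl pvStepA ([], [])).1
     else (cs.foldl pvStepA ([], [])).1 ++ [(cs.foldl pvStepA ([], [])).2]) = pvGroupsB cs := by
  have := pvLoop cs [] []
  simpa using this

-- ===== VERDICT (by name: the statement is the Claim_ definition above) =====
theorem generate_pronunciation_spec : Claim_equal_generate_pronunciation := by
  intro name _
  unfold Spec_generate_pronunciation generate_pronunciation generate_pronunciation_alt
  simp only [pvLoopNil]
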